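-- pv_equiv track=rewrite | github.com/ofekshmu/AppliedBusinessAnalytics | src/Ex4_317991735.py | list_to_last_letter_map
-- ===== SOURCE A (Python) =====
-- def list_to_last_letter_map(lst):
--     d = {}
--     for word in lst:
--         if word[0] in d.keys():
--             d[word[0]] += [word[1:]]
--         else:
--             d[word[0]] = [word[1:]]
--     return d
-- ===== SOURCE B (Python) =====
-- def list_to_last_letter_map(lst):
--     keys = list(dict.fromkeys(w[0] for w in lst))
--     return {k: [w[1:] for w in lst if w[0] == k] for k in keys}
-- ===== Notes on version B (the rewrite author's own statement) =====
-- stated objective: alternative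
-- what changed: Replaces A's single incremental pass (per-word membership test on d.keys() with append-or-create branches) by a two-pass scheme: dedup the first letters once with dict.fromkeys, then build each suffix group with a dict comprehension filtering the list per key.
import Mathlib
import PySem

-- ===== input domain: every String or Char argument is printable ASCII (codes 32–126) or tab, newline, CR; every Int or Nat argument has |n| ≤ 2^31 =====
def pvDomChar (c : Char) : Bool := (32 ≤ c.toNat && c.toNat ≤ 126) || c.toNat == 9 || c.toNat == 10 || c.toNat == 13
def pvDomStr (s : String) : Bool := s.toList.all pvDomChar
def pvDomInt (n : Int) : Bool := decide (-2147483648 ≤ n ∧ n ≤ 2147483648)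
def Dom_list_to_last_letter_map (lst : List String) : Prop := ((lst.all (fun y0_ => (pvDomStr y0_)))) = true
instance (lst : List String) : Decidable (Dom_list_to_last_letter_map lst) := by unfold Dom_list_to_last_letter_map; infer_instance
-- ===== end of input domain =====

-- B replaces A's incremental dict-building loop (per-word key test, append-or-create) by a two-pass
-- scheme: dedup the first letters once, then build each suffix group with one comprehension per key
-- (objective: alternative decomposition; same result, including dict key order).

-- shared trivial accessors: word[0] (as a 1-char string; "" stands for the IndexError case, excluded
-- by Pre_) and word[1:]
def pvFirst (w : String) : String := ((PySem.Str.pyGet? w 0).map (fun c => String.ofList [c])).getD ""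
def pvRest (w : String) : String := PySem.Str.slice w (some 1) none

-- ===== PORT A =====
def list_to_last_letter_map (lst : List String) : List (String × List String) :=
  (lst.foldl (fun d w =>
      if d.contains (pvFirst w) then
        d.modify (pvFirst w) [] (fun v => v ++ [pvRest w])
      else
        d.insert (pvFirst w) [pvRest w])
    PySem.Dict.empty).items

-- ===== PORT B =====
def list_to_last_letter_map_alt (lst : List String) : List (String × List String) :=
  (PySem.List.dedup (lst.map pvFirst)).map
    (fun k => (k, (lst.filter (fun w => pvFirst w == k)).map pvRest))

-- ===== PRECONDITION & SPEC =====
-- Pre_ excludes lists containing the empty string: there Python A raises IndexError on word[0]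
-- (and Python B raises the same way).
def Pre_list_to_last_letter_map (lst : List String) : Prop := ∀ w ∈ lst, w ≠ ""
instance (lst : List String) : Decidable (Pre_list_to_last_letter_map lst) := by unfold Pre_list_to_last_letter_map; infer_instance
def pvWitness_list_to_last_letter_map : List String := ["apple", "avocado", "banana", "b"]

def Spec_list_to_last_letter_map (lst : List String) (out : List (String × List String)) : Prop := out = list_to_last_letter_map_alt lst
instance (lst : List String) (out : List (String × List String)) : Decidable (Spec_list_to_last_letter_map lst out) := by unfold Spec_list_to_last_letter_map; infer_instance

-- ===== CLAIM (what is proved, stated in full; the proofs are below) =====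
def Claim_equal_list_to_last_letter_map : Prop := ∀ (lst : List String), Dom_list_to_last_letter_map lst → Pre_list_to_last_letter_map lst → Spec_list_to_last_letter_map lst (list_to_last_letter_map lst)

-- ===== LEMMAS AND PROOFS =====

-- A's if/else step is exactly one Python-style `d[k] = d.get(k, []) + [s]` (Dict.modify)
lemma stepA_eq_modify (d : PySem.Dict String (List String)) (w : String) :
    (if d.contains (pvFirst w) then
        d.modify (pvFirst w) [] (fun v => v ++ [pvRest w])
      else
        d.insert (pvFirst w) [pvRest w])
      = d.modify (pvFirst w) [] (fun v => v ++ [pvRest w]) := by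
  by_cases h : d.contains (pvFirst w)
  · simp [h]
  · simp [h, PySem.Dict.modify,
      PySem.Dict.getD_of_not_contains d [] (by simpa using h)]

-- ===== VERDICT (by name: the statement is the Claim_ definition above) =====
theorem list_to_last_letter_map_spec : Claim_equal_list_to_last_letter_map := by
  intro lst _ _
  unfold Spec_list_to_last_letter_map list_to_last_letter_map list_to_last_letter_map_alt
  rw [PySem.List.foldl_congr_mem _ _ _ _ (fun d w _ => stepA_eq_modify d w)]
  rw [← List.foldl_map (f := fun w => (pvFirst w, pvRest w))
        (g := fun (d : PySem.Dict String (List String)) p => d.modify p.1 [] (fun v => v ++ [p.2]))]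
  have hnd : (List.foldl (fun (d : PySem.Dict String (List String)) p => d.modify p.1 [] (fun v => v ++ [p.2]))
      PySem.Dict.empty (lst.map (fun w => (pvFirst w, pvRest w)))).keys.Nodup := by
    simpa using PySem.Dict.nodup_keys_foldl_modify_key (lst.map (fun w => (pvFirst w, pvRest w)))
      Prod.fst [] (fun _ p v => v ++ [p.2]) PySem.Dict.empty (by simp)
  rw [PySem.Dict.items_eq_map_keys _ hnd []]
  have hkeys : (List.foldl (fun (d : PySem.Dict String (List String)) p => d.modify p.1 [] (fun v => v ++ [p.2]))
      PySem.Dict.empty (lst.map (fun w => (pvFirst w, pvRest w)))).keys = PySem.Set.ofList (lst.map pvFirst) := by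
    simpa [List.map_map, Function.comp, PySem.Set.update_nil_left] using
      PySem.Dict.keys_foldl_modify_key (lst.map (fun w => (pvFirst w, pvRest w)))
        Prod.fst [] (fun _ p v => v ++ [p.2]) PySem.Dict.empty
  rw [hkeys]
  simp only [PySem.List.dedup_eq_ofList]
  refine List.map_congr_left (fun k hk => ?_)
  rw [PySem.Dict.getD_foldl_modify_append]
  simp [List.filter_map, Function.comp_def, PySem.Dict.getD_empty, List.map_map]
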